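-- pv_equiv track=rewrite | github.com/Snapzie/AdventOfCode | Day12/Day12.py | doesCompute
-- ===== SOURCE A (Python) =====
-- def doesCompute(instOrg,permutations):
--     res = []
--     for input in permutations:
--         inst = [i for i in instOrg]
--         idx = 0
--         while idx < len(input):
--             if input[idx] == '.':
--                 idx += 1
--                 continue
--             if input[idx] == '#':
--                 if len(inst) > 0:
--                     instruction = inst.pop(0)
--                 else:
--                     res.append(False)
--                     break
--
--                 remaining = len(input) - idx
--                 if remaining < instruction:
--                     res.append(False)
--                     break
--
--                 if (idx-1 < 0 or input[idx-1] == '.') and all([e == '#' for e in input[idx:idx+instruction]]):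
--                     idx = idx+instruction
--                     # continue
--                 else:
--                     res.append(False)
--                     break
--         else:
--             if len(inst) == 0:
--                 res.append(True)
--             else:
--                 res.append(False)
--     return res
-- ===== SOURCE B (Python) =====
-- def doesCompute(instOrg, permutations):
--     # For each permutation, build its list of contiguous '#'-run lengths in one
--     # pass, then compare it to the instruction list with a single list equality.
--     res = []
--     for p in permutations:
--         runs = []
--         cur = 0
--         for ch in p:
--             if ch == '#':
--                 cur += 1
--             else:
--                 if cur > 0:
--                     runs.append(cur)
--                 cur = 0
--         if cur > 0:
--             runs.append(cur)
--         res.append(runs == instOrg)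
--     return res
-- ===== Notes on version B (the rewrite author's own statement) =====
-- stated objective: simpler
-- what changed: Instead of A's index-advancing scan that pops instructions, checks the previous character and jumps by the instruction length (with early breaks), B computes each string's list of contiguous '#'-run lengths in one plain pass and compares it to instOrg with a single list equality.
-- outside the precondition, e.g. on doesCompute([-1, 2], ['#']): A returns [True], B returns [False]; on doesCompute([0, 1], ['#']): A returns [True], B returns [False]; on doesCompute([-3], ['#']): A raises IndexError, B returns [False]
import Mathlib
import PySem

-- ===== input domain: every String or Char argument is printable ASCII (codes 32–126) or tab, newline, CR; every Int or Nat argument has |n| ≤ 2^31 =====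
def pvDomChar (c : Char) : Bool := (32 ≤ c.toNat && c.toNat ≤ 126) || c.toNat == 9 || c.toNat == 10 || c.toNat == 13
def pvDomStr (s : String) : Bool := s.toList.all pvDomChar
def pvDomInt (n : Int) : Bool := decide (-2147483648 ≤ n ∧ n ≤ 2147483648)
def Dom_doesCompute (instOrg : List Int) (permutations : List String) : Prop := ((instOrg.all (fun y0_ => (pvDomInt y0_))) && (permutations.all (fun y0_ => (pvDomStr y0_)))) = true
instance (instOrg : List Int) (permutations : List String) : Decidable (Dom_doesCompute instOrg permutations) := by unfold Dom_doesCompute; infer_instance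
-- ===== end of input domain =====

-- B computes each string's '#'-run lengths in one pass and compares to instOrg; same values as A on Pre_ (simpler decomposition, no speed claim).

-- ===== PORT A =====
-- the while loop of A; fuel only makes the recursion total (inside Pre_ the index
-- strictly increases, so `input.length + 1` fuel is never exhausted)
def aGo : Nat → List Char → List Int → Int → Bool
  | 0, _, _, _ => false
  | fuel + 1, input, inst, idx =>
    if idx < (input.length : Int) then
      match PySem.List.pyGet? input idx with
      | none => false      -- IndexError (reachable only outside Pre_)
      | some c =>
        if c = '.' then aGo fuel input inst (idx + 1)
        else if c = '#' then
          match inst with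
          | [] => false
          | instruction :: rest =>
            if (input.length : Int) - idx < instruction then false
            else if (idx - 1 < 0 ∨ PySem.List.pyGet? input (idx - 1) = some '.')
                     ∧ (PySem.List.slice input (some idx) (some (idx + instruction))).all (fun e => e == '#') = true
            then aGo fuel input rest (idx + instruction)
            else false
        else aGo fuel input inst idx   -- other characters: Python loops forever (outside Pre_)
    else decide (inst = [])

def doesCompute (instOrg : List Int) (permutations : List String) : List Bool :=
  permutations.foldl
    (fun res input => res ++ [aGo (input.toList.length + 1) input.toList instOrg 0]) []

-- ===== PORT B =====
def bStep (st : List Int × Int) (ch : Char) : List Int × Int :=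
  if ch = '#' then (st.1, st.2 + 1)
  else (if 0 < st.2 then st.1 ++ [st.2] else st.1, 0)

def bRuns (p : List Char) : List Int :=
  let st := p.foldl bStep ([], 0)
  if 0 < st.2 then st.1 ++ [st.2] else st.1

def doesCompute_alt (instOrg : List Int) (permutations : List String) : List Bool :=
  permutations.foldl (fun res p => res ++ [decide (bRuns p.toList = instOrg)]) []

-- ===== PRECONDITION & SPEC =====
-- Pre_ excludes (a) strings with characters other than '.'/'#', on which A literally never
-- advances idx and loops forever, and (b) when some string contains '#', instruction lists
-- with an entry < 1, on which A's negative-index jumps either raise IndexError or return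
-- accidental wraparound values no specification would pick.
def Pre_doesCompute (instOrg : List Int) (permutations : List String) : Prop :=
  (permutations.all (fun p => p.toList.all (fun c => c == '.' || c == '#'))) = true ∧
  ((instOrg.all (fun m => decide (1 ≤ m))) = true ∨
    (permutations.all (fun p => !(p.toList.contains '#'))) = true)

instance (instOrg : List Int) (permutations : List String) : Decidable (Pre_doesCompute instOrg permutations) := by
  unfold Pre_doesCompute; infer_instance

def pvWitness_doesCompute : List Int × List String := ([1], ["#."])

def Spec_doesCompute (instOrg : List Int) (permutations : List String) (out : List Bool) : Prop := out = doesCompute_alt instOrg permutations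
instance (instOrg : List Int) (permutations : List String) (out : List Bool) : Decidable (Spec_doesCompute instOrg permutations out) := by unfold Spec_doesCompute; infer_instance

-- ===== CLAIM (what is proved, stated in full; the proofs are below) =====
def Claim_equal_doesCompute : Prop := ∀ (instOrg : List Int) (permutations : List String), Dom_doesCompute instOrg permutations → Pre_doesCompute instOrg permutations → Spec_doesCompute instOrg permutations (doesCompute instOrg permutations)

-- ===== LEMMAS AND PROOFS =====

-- reference run-length function: runsP cur cs = run lengths of cs with `cur` pending '#'s
def runsP : Int → List Char → List Int
  | cur, [] => if 0 < cur then [cur] else []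
  | cur, c :: t =>
    if c = '#' then runsP (cur + 1) t
    else if 0 < cur then cur :: runsP 0 t else runsP 0 t

theorem bfold_eq (cs : List Char) : ∀ (acc : List Int) (cur : Int),
    (let st := cs.foldl bStep (acc, cur);
     if 0 < st.2 then st.1 ++ [st.2] else st.1) = acc ++ runsP cur cs := by
  induction cs with
  | nil => intro acc cur; simp [runsP]; split <;> simp
  | cons c t ih =>
    intro acc cur
    simp only [List.foldl_cons, bStep, runsP]
    by_cases hc : c = '#'
    · simp [hc, ih]
    · simp only [hc, if_false]
      by_cases h0 : 0 < cur <;> simp [h0, ih]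

theorem bRuns_eq (p : List Char) : bRuns p = runsP 0 p := by
  simpa using bfold_eq p [] 0

theorem runsP_pos (t : List Char) : ∀ (cur : Int), 0 < cur →
    runsP cur t = (cur + ((t.takeWhile (fun c => c = '#')).length : Int))
                    :: runsP 0 (t.dropWhile (fun c => c = '#')) := by
  induction t with
  | nil => intro cur h; simp [runsP, h]
  | cons c t ih =>
    intro cur h
    by_cases hc : c = '#'
    · simp only [runsP, hc, if_true, List.takeWhile_cons, List.dropWhile_cons]
      rw [ih (cur + 1) (by omega)]
      simp
      ring
    · simp [runsP, hc, h]

theorem runsP_hash (t : List Char) (h : t[0]? = some '#') :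
    runsP 0 t = (((t.takeWhile (fun c => c = '#')).length : Int))
                  :: runsP 0 (t.dropWhile (fun c => c = '#')) := by
  cases t with
  | nil => simp at h
  | cons c t' =>
    simp only [List.getElem?_cons_zero, Option.some.injEq] at h
    subst h
    simp only [runsP, if_true]
    rw [runsP_pos t' (0 + 1) (by omega)]
    simp
    ring

-- (t.take m).all (·=='#') ↔ m ≤ leading-'#' count, for m ≤ t.length
theorem take_all_hash (t : List Char) : ∀ (m : Nat), m ≤ t.length →
    ((t.take m).all (fun e => e == '#') = true ↔ m ≤ (t.takeWhile (fun c => c = '#')).length) := by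
  induction t with
  | nil => intro m hm; simp_all
  | cons c t ih =>
    intro m hm
    cases m with
    | zero => simp
    | succ m' =>
      simp only [List.take_succ_cons, List.all_cons, List.takeWhile_cons, Bool.and_eq_true, beq_iff_eq]
      by_cases hc : c = '#'
      · simp only [hc, decide_true, if_pos, List.length_cons]
        rw [ih m' (by simpa using hm)]
        constructor
        · rintro ⟨-, h⟩; omega
        · intro h; exact ⟨trivial, by omega⟩
      · constructor
        · rintro ⟨h1, -⟩; exact absurd h1 hc
        · intro h; simp [hc] at h

theorem drop_dropWhile (t : List Char) (p : Char → Prop) [DecidablePred p] :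
    t.drop ((t.takeWhile (fun c => decide (p c))).length) = t.dropWhile (fun c => decide (p c)) := by
  induction t with
  | nil => simp
  | cons c t ih =>
    by_cases hc : p c <;> simp [hc, ih]

theorem dropWhile_head_false {α : Type} (p : α → Bool) :
    ∀ (l : List α) (x : α) (r : List α), l.dropWhile p = x :: r → p x = false := by
  intro l
  induction l with
  | nil => intro x r h; simp at h
  | cons c t ih =>
    intro x r h
    rw [List.dropWhile_cons] at h
    split at h
    · exact ih x r h
    · cases h; simp_all

theorem takeWhile_getElem_hash (t : List Char) :
    ∀ (m : Nat), m < (t.takeWhile (fun c => c = '#')).length → t[m]? = some '#' := by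
  induction t with
  | nil => simp
  | cons c t ih =>
    intro m hm
    rw [List.takeWhile_cons] at hm
    by_cases hc : c = '#'
    · simp only [hc, decide_true, if_pos, List.length_cons] at hm
      cases m with
      | zero => simp [hc]
      | succ m' => simpa using ih m' (by omega)
    · simp [hc] at hm

-- main loop lemma for port A
theorem aGo_eq (input : List Char) (hc : ∀ c ∈ input, c = '.' ∨ c = '#') :
    ∀ (fuel : Nat) (inst : List Int) (j : Nat),
      j ≤ input.length →
      input.length - j + 1 ≤ fuel →
      ((∀ m ∈ inst, 1 ≤ m) ∨ '#' ∉ input) →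
      (input[j]? = some '#' → j = 0 ∨ input[j-1]? = some '.') →
      aGo fuel input inst (j : Int) = decide (runsP 0 (input.drop j) = inst) := by
  intro fuel
  induction fuel with
  | zero => intro inst j hj hf hi hinv; omega
  | succ f ih =>
    intro inst j hj hf hi hinv
    by_cases hjl : j < input.length
    · -- loop body runs
      have hget : PySem.List.pyGet? input (j : Int) = some (input[j]'hjl) := by
        simp [List.getElem?_eq_getElem hjl]
      have hcond : (j : Int) < (input.length : Int) := by exact_mod_cast hjl
      have hdropj : input.drop j = (input[j]'hjl) :: input.drop (j + 1) :=
        List.drop_eq_getElem_cons hjl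
      rcases hc (input[j]'hjl) (List.getElem_mem _) with hdot | hhash
      · -- current character is '.'
        have hstep : aGo (f + 1) input inst (j : Int) = aGo f input inst ((j : Int) + 1) := by
          simp only [aGo, hget]
          rw [if_pos hcond, if_pos hdot]
        rw [hstep]
        have hcast : (j : Int) + 1 = ((j + 1 : Nat) : Int) := by push_cast; ring
        rw [hcast, ih inst (j + 1) (by omega) (by omega) hi ?inv]
        case inv =>
          intro _
          right
          simp [List.getElem?_eq_getElem hjl, hdot]
        congr 1
        rw [hdropj]
        simp [runsP, hdot]
      · -- current character is '#'
        have hdj0 : (input.drop j)[0]? = some '#' := by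
          rw [hdropj]; simp [hhash]
        have hRuns := runsP_hash (input.drop j) hdj0
        have hK1 : 1 ≤ ((input.drop j).takeWhile (fun c => c = '#')).length := by
          rw [hdropj]; simp [hhash]
        have hKle : ((input.drop j).takeWhile (fun c => c = '#')).length ≤ input.length - j := by
          have := (List.takeWhile_prefix (l := input.drop j) (p := fun c => decide (c = '#'))).length_le
          simpa using this
        set K := ((input.drop j).takeWhile (fun c => c = '#')).length with hKdef
        cases inst with
        | nil =>
          have : aGo (f + 1) input [] (j : Int) = false := by
            simp only [aGo, hget]
            rw [if_pos hcond, if_neg (by simp [hhash]), if_pos hhash]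
          rw [this, hRuns]
          symm
          rw [decide_eq_false_iff_not]
          simp
        | cons n rest =>
          have hin : '#' ∈ input := hhash ▸ List.getElem_mem _
          have hpos : ∀ m ∈ n :: rest, 1 ≤ m := by
            rcases hi with h | h
            · exact h
            · exact absurd hin h
          have hn : 1 ≤ n := hpos n (by simp)
          -- the previous-character test is satisfied
          have hprevI : ((j : Int) - 1 < 0 ∨ PySem.List.pyGet? input ((j : Int) - 1) = some '.') := by
            by_cases hj0 : j = 0
            · left; omega
            · rcases hinv (by rw [List.getElem?_eq_getElem hjl, hhash]) with h | h
              · exact absurd h hj0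
              · right
                have : (j : Int) - 1 = ((j - 1 : Nat) : Int) := by omega
                rw [this]
                simpa using h
          by_cases hrem : (input.length : Int) - j < n
          · -- instruction longer than the remaining string: A breaks with False
            have : aGo (f + 1) input (n :: rest) (j : Int) = false := by
              simp only [aGo, hget]
              rw [if_pos hcond, if_neg (by simp [hhash]), if_pos hhash, if_pos hrem]
            rw [this, hRuns]
            symm
            rw [decide_eq_false_iff_not]
            intro h
            injection h with h1 _
            omega
          · have hslice : PySem.List.slice input (some (j : Int)) (some ((j : Int) + n)) =
                (input.drop j).take n.toNat := by
              have h0 : (0 : Int) ≤ (j : Int) := by omega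
              have h1 : (0 : Int) ≤ (j : Int) + n := by omega
              rw [PySem.List.slice_toNat input h0 h1]
              simp only [Int.toNat_natCast]
              congr 1
              omega
            have hnlen : n.toNat ≤ (input.drop j).length := by
              simp only [List.length_drop]; omega
            by_cases hall : n.toNat ≤ K
            · -- the slice is all '#'
              have halltrue : ((input.drop j).take n.toNat).all (fun e => e == '#') = true :=
                (take_all_hash (input.drop j) n.toNat hnlen).mpr hall
              have hstep : aGo (f + 1) input (n :: rest) (j : Int) =
                  aGo f input rest ((j : Int) + n) := by
                simp only [aGo, hget]
                rw [if_pos hcond, if_neg (by simp [hhash]), if_pos hhash, if_neg hrem,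
                  if_pos ⟨hprevI, by rw [hslice]; exact halltrue⟩]
              rw [hstep]
              by_cases hnK : n.toNat = K
              · -- exactly the whole run: recurse behind it
                have hjn : (j : Int) + n = ((j + K : Nat) : Int) := by push_cast; omega
                have hdrop2 : input.drop (j + K) = (input.drop j).dropWhile (fun c => c = '#') := by
                  rw [← drop_dropWhile (input.drop j) (fun c => c = '#'), ← hKdef]
                  rw [← List.drop_drop]
                have hinv2 : input[j + K]? = some '#' → j + K = 0 ∨ input[j + K - 1]? = some '.' := by
                  intro habs
                  exfalso
                  have h1 : (input.drop (j + K))[0]? = some '#' := by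
                    rw [List.getElem?_drop]; simpa using habs
                  rw [hdrop2] at h1
                  cases hdw : (input.drop j).dropWhile (fun c => c = '#') with
                  | nil => rw [hdw] at h1; simp at h1
                  | cons x r =>
                    rw [hdw] at h1
                    simp only [List.getElem?_cons_zero, Option.some.injEq] at h1
                    have := dropWhile_head_false _ (input.drop j) x r hdw
                    simp [h1] at this
                rw [hjn, ih rest (j + K) (by omega) (by omega) (Or.inl (fun m hm => hpos m (by simp [hm]))) hinv2]
                rw [hRuns, hdrop2]
                have hnKi : n = (K : Int) := by omega
                rw [decide_eq_decide, hnKi]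
                simp
              · -- instruction shorter than the run: the next step fails on both sides
                have hnK' : n.toNat < K := by omega
                have hjn : (j : Int) + n = ((j + n.toNat : Nat) : Int) := by push_cast; omega
                have hj'l : j + n.toNat < input.length := by omega
                have hhash' : input[j + n.toNat]? = some '#' := by
                  rw [← List.getElem?_drop]
                  exact takeWhile_getElem_hash (input.drop j) n.toNat hnK'
                have hprev' : PySem.List.pyGet? input ((j : Int) + n - 1) = some '#' := by
                  have hc1 : (j : Int) + n - 1 = ((j + (n.toNat - 1) : Nat) : Int) := by omega
                  rw [hc1, PySem.List.pyGet?_natCast, ← List.getElem?_drop]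
                  exact takeWhile_getElem_hash (input.drop j) (n.toNat - 1) (by omega)
                have hfalse : aGo f input rest ((j : Int) + n) = false := by
                  cases f with
                  | zero => omega
                  | succ f' =>
                    rw [hjn]
                    have hget' : PySem.List.pyGet? input ((j + n.toNat : Nat) : Int) =
                        some (input[j + n.toNat]'hj'l) := by
                      rw [PySem.List.pyGet?_natCast]
                      simp [List.getElem?_eq_getElem hj'l]
                    have hh : (input[j + n.toNat]'hj'l) = '#' := by
                      have h2 := List.getElem?_eq_getElem hj'l
                      rw [h2] at hhash'
                      exact Option.some_inj.mp hhash'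
                    cases rest with
                    | nil =>
                      simp only [aGo, hget', hh]
                      rw [if_pos (by exact_mod_cast hj'l)]
                      simp
                    | cons m rest' =>
                      simp only [aGo, hget', hh]
                      rw [if_pos (by exact_mod_cast hj'l)]
                      rw [if_neg (show ¬('#' : Char) = '.' by decide),
                        if_pos trivial]
                      split
                      · rfl
                      · rw [if_neg]
                        rintro ⟨hor, -⟩
                        rcases hor with habs | habs
                        · push_cast at habs; omega
                        · rw [show ((j + n.toNat : Nat) : Int) - 1 = (j : Int) + n - 1 by omega,
                            hprev'] at habs
                          simp at habs
                rw [hfalse, hRuns]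
                symm
                rw [decide_eq_false_iff_not]
                intro h
                injection h with h1 _
                omega
            · -- the slice is not all '#': A breaks with False
              have hallfalse : ¬ ((input.drop j).take n.toNat).all (fun e => e == '#') = true := by
                intro h
                exact hall ((take_all_hash (input.drop j) n.toNat hnlen).mp h)
              have : aGo (f + 1) input (n :: rest) (j : Int) = false := by
                simp only [aGo, hget]
                rw [if_pos hcond, if_neg (by simp [hhash]), if_pos hhash, if_neg hrem, if_neg]
                rintro ⟨-, h⟩
                exact hallfalse (hslice ▸ h)
              rw [this, hRuns]
              symm
              rw [decide_eq_false_iff_not]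
              intro h
              injection h with h1 _
              omega
    · -- idx ≥ len(input): the while-else clause
      have hj' : j = input.length := by omega
      have : aGo (f + 1) input inst (j : Int) = decide (inst = []) := by
        simp only [aGo]
        rw [if_neg (by exact_mod_cast hjl)]
      rw [this, hj', List.drop_length]
      rw [decide_eq_decide]
      simp [runsP, eq_comm]

-- kill the fold-with-append at top level
theorem fold_append_map {α β : Type} (f : α → β) (l : List α) : ∀ (acc : List β),
    l.foldl (fun res x => res ++ [f x]) acc = acc ++ l.map f := by
  induction l with
  | nil => simp
  | cons x t ih => intro acc; simp [ih]

theorem perString (input : List Char) (inst : List Int)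
    (hc : ∀ c ∈ input, c = '.' ∨ c = '#')
    (hi : (∀ m ∈ inst, 1 ≤ m) ∨ '#' ∉ input) :
    aGo (input.length + 1) input inst 0 = decide (bRuns input = inst) := by
  have h := aGo_eq input hc (input.length + 1) inst 0 (by omega) (by omega) hi (by simp)
  simpa [bRuns_eq] using h

-- ===== VERDICT (by name: the statement is the Claim_ definition above) =====
theorem doesCompute_spec : Claim_equal_doesCompute := by
  intro instOrg permutations _ hpre
  unfold Spec_doesCompute doesCompute doesCompute_alt
  rw [fold_append_map, fold_append_map]
  simp only [List.nil_append]
  apply List.map_congr_left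
  intro p hp
  obtain ⟨h1, h2⟩ := hpre
  simp only [List.all_eq_true] at h1
  apply perString
  · intro c hcmem
    have := h1 p hp
    have := this c hcmem
    simp only [Bool.or_eq_true, beq_iff_eq] at this
    exact this
  · rcases h2 with h | h
    · left
      intro m hm
      simp only [List.all_eq_true] at h
      simpa using h m hm
    · right
      simp only [List.all_eq_true] at h
      have := h p hp
      simpa using this
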